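-- pv_equiv track=rewrite | github.com/rv701/CAN-Sprinter | CAN_GUI.py | get_hex_bits
-- ===== SOURCE A (Python) =====
-- def get_hex_bits(number, offset, count):
--
-- 	mask = 0
--
-- 	for i in range(0, 64):
-- 		if (i >= offset) and (i < (offset + count)) :
-- 			mask = mask | 1
-- 		#if (i >= (offset + count)) :
-- 		#	mask = mask | 1
-- 		if (i < 63) :
-- 			mask = mask << 1
--
-- 	number = number & mask
-- 	number = number >> 64 - offset - count
--
-- 	return number
-- ===== SOURCE B (Python) =====
-- def get_hex_bits(number, offset, count):
--     lo = max(offset, 0)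
--     hi = min(offset + count, 64)
--     width = max(hi - lo, 0)
--     mask = ((1 << width) - 1) << (64 - hi)
--     return (number & mask) >> (64 - offset - count)
-- ===== Notes on version B (the rewrite author's own statement) =====
-- stated objective: simpler
-- what changed: Replaces the 64-iteration mask-building bit loop with a direct closed-form mask ((1 << width) - 1) << (64 - hi) computed from the clamped bit interval, a single arithmetic expression.
import Mathlib
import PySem

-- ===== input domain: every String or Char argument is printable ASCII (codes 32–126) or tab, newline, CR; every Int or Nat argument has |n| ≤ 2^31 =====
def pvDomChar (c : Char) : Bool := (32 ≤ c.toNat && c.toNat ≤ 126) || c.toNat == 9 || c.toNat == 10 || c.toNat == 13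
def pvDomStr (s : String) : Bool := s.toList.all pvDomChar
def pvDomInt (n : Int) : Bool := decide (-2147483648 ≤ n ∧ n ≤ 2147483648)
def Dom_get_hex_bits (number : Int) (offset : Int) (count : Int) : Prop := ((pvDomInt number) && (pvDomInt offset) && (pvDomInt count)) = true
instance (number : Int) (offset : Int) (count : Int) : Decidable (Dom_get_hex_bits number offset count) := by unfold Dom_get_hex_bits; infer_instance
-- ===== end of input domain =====

-- B replaces A's 64-iteration mask-building loop by a closed-form mask computed from the
-- clamped bit interval (objective: simpler — one arithmetic expression instead of a loop).

-- ===== PORT A =====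
-- The literal body of A's loop:
--   if (i >= offset) and (i < (offset + count)): mask = mask | 1
--   if (i < 63): mask = mask << 1
def pvStep (offset count : Int) (mask : Int) (i : Int) : Int :=
  let mask := if offset ≤ i ∧ i < offset + count then PySem.Int.bor mask 1 else mask
  if i < 63 then mask <<< (1 : Nat) else mask

def get_hex_bits (number : Int) (offset : Int) (count : Int) : Int :=
  -- mask = 0; for i in range(0, 64): <pvStep>
  let mask : Int := (PySem.List.pyRange 0 64 1).foldl (pvStep offset count) 0
  let number := PySem.Int.band number mask
  -- number >> 64 - offset - count  (nonnegative shift amount under Pre_)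
  number >>> (64 - offset - count).toNat

-- ===== PORT B =====
def get_hex_bits_alt (number : Int) (offset : Int) (count : Int) : Int :=
  let lo := max offset 0
  let hi := min (offset + count) 64
  let width := (max (hi - lo) 0).toNat                          -- nonnegative by construction
  let mask : Int := (((1 : Int) <<< width) - 1) <<< (64 - hi).toNat   -- 64 - hi ≥ 0 since hi ≤ 64
  PySem.Int.band number mask >>> (64 - offset - count).toNat

-- ===== PRECONDITION & SPEC =====
-- Pre_ excludes exactly the inputs where A raises ValueError (the shift amount
-- 64 - offset - count is negative); B raises there too.
def Pre_get_hex_bits (number : Int) (offset : Int) (count : Int) : Prop :=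
  offset + count ≤ 64
instance (number : Int) (offset : Int) (count : Int) : Decidable (Pre_get_hex_bits number offset count) := by unfold Pre_get_hex_bits; infer_instance

def pvWitness_get_hex_bits : Int × Int × Int := (300, 4, 8)

def Spec_get_hex_bits (number : Int) (offset : Int) (count : Int) (out : Int) : Prop := out = get_hex_bits_alt number offset count
instance (number : Int) (offset : Int) (count : Int) (out : Int) : Decidable (Spec_get_hex_bits number offset count out) := by unfold Spec_get_hex_bits; infer_instance

-- ===== CLAIM (what is proved, stated in full; the proofs are below) =====
def Claim_equal_get_hex_bits : Prop := ∀ (number : Int) (offset : Int) (count : Int), Dom_get_hex_bits number offset count → Pre_get_hex_bits number offset count → Spec_get_hex_bits number offset count (get_hex_bits number offset count)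

-- ===== LEMMAS AND PROOFS =====

-- Mask of A's loop after the first k iterations (each of them ends in a shift when k ≤ 63):
-- the bits at loop indices [max offset 0, min (offset+count) k) shifted up by the later shifts.
def pvE (offset count : Int) (k : Int) : Int :=
  (2 ^ (max (min (offset + count) k - max offset 0) 0).toNat - 1)
    * 2 ^ (k + 1 - min (offset + count) k).toNat

-- B's mask, written arithmetically.
def pvClosedArith (offset count : Int) : Int :=
  (2 ^ (max (min (offset + count) 64 - max offset 0) 0).toNat - 1)
    * 2 ^ (64 - min (offset + count) 64).toNat

-- `m | 1` adds 1 to an even nonnegative m.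
lemma pvOr_one (n : Nat) : 2 * n ||| 1 = 2 * n + 1 := by
  apply Nat.eq_of_testBit_eq
  intro i
  cases i with
  | zero => simp [Nat.testBit_zero, Nat.mul_mod_right]
  | succ i =>
      have h1 : 2 * n / 2 = n := by omega
      have h2 : (2 * n + 1) / 2 = n := by omega
      have h3 : (1 : Nat) / 2 = 0 := by omega
      rw [Nat.testBit_lor]
      simp [Nat.testBit_succ, h1, h2, h3]

lemma pvBorEven (t : Int) (ht : 0 ≤ t) : PySem.Int.bor (t * 2) 1 = t * 2 + 1 := by
  rw [PySem.Int.bor_of_nonneg (by omega) (by omega)]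
  have h : (t * 2).toNat = 2 * t.toNat := by omega
  have h1 : (1 : Int).toNat = 1 := rfl
  rw [h, h1, pvOr_one]
  omega

-- Loop invariant: after the first k ≤ 63 iterations the mask is pvE.
lemma pvLoop_inv (offset count : Int) : ∀ k : Nat, k ≤ 63 →
    (PySem.List.pyRange 0 (k : Int) 1).foldl (pvStep offset count) 0 = pvE offset count k := by
  intro k
  induction k with
  | zero =>
      intro _
      rw [PySem.List.pyRange_one_eq_nil (by norm_num)]
      simp [pvE]
  | succ k ih =>
      intro hk
      have hcast : (((k + 1 : Nat)) : Int) = (k : Int) + 1 := by push_cast; ring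
      rw [hcast, PySem.List.pyRange_one_succ_right (by positivity), List.foldl_append,
        ih (by omega)]
      show pvStep offset count (pvE offset count k) (k : Int) = pvE offset count ((k : Int) + 1)
      simp only [pvStep]
      rw [if_pos (show (k : Int) < 63 by omega)]
      rw [Int.shiftLeft_eq, pow_one]
      by_cases hab : offset ≤ (k : Int) ∧ (k : Int) < offset + count
      · rw [if_pos hab]
        have e1 : min (offset + count) (k : Int) = (k : Int) := by omega
        have es : ((k : Int) + 1 - (k : Int)).toNat = 1 := by omega
        have e2 : min (offset + count) ((k : Int) + 1) = (k : Int) + 1 := by omega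
        have es2 : ((k : Int) + 1 + 1 - ((k : Int) + 1)).toNat = 1 := by omega
        have hw : ((k : Int) + 1 - max offset 0).toNat = ((k : Int) - max offset 0).toNat + 1 := by
          omega
        have hw' : (max ((k : Int) + 1 - max offset 0) 0).toNat
            = (max ((k : Int) - max offset 0) 0).toNat + 1 := by omega
        simp only [pvE, e1, es, e2, es2, pow_one]
        rw [hw',
          pvBorEven _ (by have := pow_pos (show (0:Int) < 2 by norm_num)
                             (max ((k : Int) - max offset 0) 0).toNat; omega)]
        rw [pow_succ]
        ring
      · rw [if_neg hab]
        by_cases hb : offset + count ≤ (k : Int)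
        · have e1 : min (offset + count) (k : Int) = offset + count := by omega
          have e2 : min (offset + count) ((k : Int) + 1) = offset + count := by omega
          have e3 : ((k : Int) + 1 + 1 - (offset + count)).toNat
              = ((k : Int) + 1 - (offset + count)).toNat + 1 := by omega
          simp only [pvE, e1, e2, e3, pow_succ]
          ring
        · have w1 : (max (min (offset + count) (k : Int) - max offset 0) 0).toNat = 0 := by omega
          have w2 : (max (min (offset + count) ((k : Int) + 1) - max offset 0) 0).toNat = 0 := by
            omega
          simp [pvE, w1, w2]

-- The whole loop (63 shifted iterations plus the unshifted 64th) gives B's mask.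
lemma pvLoop_eq (offset count : Int) :
    (PySem.List.pyRange 0 64 1).foldl (pvStep offset count) 0 = pvClosedArith offset count := by
  rw [show (64 : Int) = 63 + 1 by norm_num,
    PySem.List.pyRange_one_succ_right (by norm_num), List.foldl_append]
  have h := pvLoop_inv offset count 63 (by norm_num)
  norm_num at h
  rw [h]
  show pvStep offset count (pvE offset count 63) 63 = pvClosedArith offset count
  simp only [pvStep]
  rw [if_neg (lt_irrefl (63 : Int))]
  by_cases hb : (63 : Int) < offset + count
  · by_cases ha : offset ≤ (63 : Int)
    · rw [if_pos ⟨ha, hb⟩]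
      have e1 : min (offset + count) (63 : Int) = 63 := by omega
      have es : ((63 : Int) + 1 - 63).toNat = 1 := by norm_num
      have e2 : min (offset + count) (64 : Int) = 64 := by omega
      have es2 : ((64 : Int) - 64).toNat = 0 := by norm_num
      have hw : (max ((64 : Int) - max offset 0) 0).toNat
          = (max ((63 : Int) - max offset 0) 0).toNat + 1 := by omega
      simp only [pvE, pvClosedArith, e1, es, e2, es2, hw]
      rw [pow_one, pow_zero, mul_one,
        pvBorEven _ (by have := pow_pos (show (0:Int) < 2 by norm_num)
                           (max ((63 : Int) - max offset 0) 0).toNat; omega)]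
      rw [pow_succ]
      ring
    · rw [if_neg (by omega)]
      have w1 : (max (min (offset + count) (63 : Int) - max offset 0) 0).toNat = 0 := by omega
      have w2 : (max (min (offset + count) (64 : Int) - max offset 0) 0).toNat = 0 := by omega
      simp [pvE, pvClosedArith, w1, w2]
  · rw [if_neg (by omega)]
    have e1 : min (offset + count) (63 : Int) = offset + count := by omega
    have e2 : min (offset + count) (64 : Int) = offset + count := by omega
    have e3 : ((63 : Int) + 1 - (offset + count)).toNat = ((64 : Int) - (offset + count)).toNat := by
      omega
    simp only [pvE, pvClosedArith, e1, e2, e3]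

-- ===== VERDICT (by name: the statement is the Claim_ definition above) =====
theorem get_hex_bits_spec : Claim_equal_get_hex_bits := by
  intro number offset count _ _
  show get_hex_bits number offset count = get_hex_bits_alt number offset count
  unfold get_hex_bits get_hex_bits_alt
  rw [pvLoop_eq]
  simp only [pvClosedArith, Int.shiftLeft_eq, one_mul]
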